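-- pv_equiv track=rewrite | github.com/cristinakluyeva/course_paper_3 | utils.py | get_id_info
-- ===== SOURCE A (Python) =====
-- def get_id_info(lst: list, oid: int) -> list:
--     """
--     Функция возвращает список с информацией об операциях по их id
--     :param lst: Список операций.
--     :param oid: Идентификатор операции.
--     :return: Список с информацией по операциям
--     """
--     operation = lst[oid]
--     operation_id = operation["id"]
--     id_info = []
--     for oper in lst:
--         if oper["id"] == operation_id:
--             id_info.append(oper)
--
--     return id_info
-- ===== SOURCE B (Python) =====
-- def get_id_info(lst: list, oid: int) -> list:
--     target = lst[oid]["id"]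
--
--     def collect(rest):
--         if not rest:
--             return []
--         head = rest[0]
--         tail = collect(rest[1:])
--         return [head] + tail if head["id"] == target else tail
--
--     return collect(lst)
-- ===== Notes on version B (the rewrite author's own statement) =====
-- stated objective: alternative
-- what changed: B replaces A's imperative accumulator loop by a recursive decomposition that builds the result front-to-back by consing matching operations onto the recursive result for the tail.
import Mathlib
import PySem

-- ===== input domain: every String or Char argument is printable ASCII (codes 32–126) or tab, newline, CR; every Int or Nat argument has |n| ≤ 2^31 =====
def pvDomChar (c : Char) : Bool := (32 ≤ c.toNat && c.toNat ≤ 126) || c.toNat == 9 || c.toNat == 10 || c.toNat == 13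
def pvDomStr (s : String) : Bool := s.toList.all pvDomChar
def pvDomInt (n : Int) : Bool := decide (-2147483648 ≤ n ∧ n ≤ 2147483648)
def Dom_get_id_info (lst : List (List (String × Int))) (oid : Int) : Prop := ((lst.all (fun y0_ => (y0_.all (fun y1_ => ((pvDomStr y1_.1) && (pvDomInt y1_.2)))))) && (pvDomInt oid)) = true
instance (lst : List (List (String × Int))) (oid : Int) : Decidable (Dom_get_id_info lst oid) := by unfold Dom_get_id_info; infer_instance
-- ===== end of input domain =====

-- B replaces A's accumulator loop with a recursive collect that conses matches; proved equal where A returns (index in range, every operation has an "id" key).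

-- dict lookup oper["id"] (first match in the association list), shared helper
def lookupId (d : List (String × Int)) : Option Int := (PySem.Dict.mk d).get? "id"

-- ===== PORT A =====
def get_id_info (lst : List (List (String × Int))) (oid : Int) : List (List (String × Int)) :=
  match PySem.List.pyGet? lst oid with
  | none => []                       -- IndexError, excluded by Pre_
  | some operation =>
    match lookupId operation with
    | none => []                     -- KeyError, excluded by Pre_
    | some operation_id =>
      lst.foldl (fun id_info oper =>
        if lookupId oper == some operation_id then id_info ++ [oper] else id_info) []

-- ===== PORT B =====
-- recursive collect: cons head onto the recursively collected tail when its id matches the target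
def collectById (target : Int) : List (List (String × Int)) → List (List (String × Int))
  | [] => []
  | head :: rest =>
    let tail := collectById target rest
    if lookupId head == some target then head :: tail else tail

def get_id_info_alt (lst : List (List (String × Int))) (oid : Int) : List (List (String × Int)) :=
  match PySem.List.pyGet? lst oid with
  | none => []                       -- IndexError, excluded by Pre_
  | some operation =>
    match lookupId operation with
    | none => []                     -- KeyError, excluded by Pre_
    | some target => collectById target lst

-- ===== PRECONDITION & SPEC =====
-- Pre_: the index is in range and every operation dict has an "id" key; elsewhere A raises (IndexError/KeyError).
def Pre_get_id_info (lst : List (List (String × Int))) (oid : Int) : Prop :=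
  PySem.Raise.InRange lst.length oid ∧ ∀ d ∈ lst, (lookupId d).isSome = true
instance (lst : List (List (String × Int))) (oid : Int) : Decidable (Pre_get_id_info lst oid) := by unfold Pre_get_id_info; infer_instance
def pvWitness_get_id_info : (List (List (String × Int))) × Int := ([[("id", 1)], [("id", 2)], [("id", 1)]], 0)
def Spec_get_id_info (lst : List (List (String × Int))) (oid : Int) (out : List (List (String × Int))) : Prop := out = get_id_info_alt lst oid
instance (lst : List (List (String × Int))) (oid : Int) (out : List (List (String × Int))) : Decidable (Spec_get_id_info lst oid out) := by unfold Spec_get_id_info; infer_instance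

-- ===== CLAIM =====
def Claim_equal_get_id_info : Prop := ∀ (lst : List (List (String × Int))) (oid : Int), Dom_get_id_info lst oid → Pre_get_id_info lst oid → Spec_get_id_info lst oid (get_id_info lst oid)

-- ===== LEMMAS AND PROOFS =====

-- B's recursion is the filter of the list by id = target
theorem collectById_eq_filter (target : Int) (l : List (List (String × Int))) :
    collectById target l = l.filter (fun oper => lookupId oper == some target) := by
  induction l with
  | nil => rfl
  | cons head rest ih => simp [collectById, ih, List.filter_cons]

theorem get_id_info_spec : Claim_equal_get_id_info := by
  intro lst oid _ _
  unfold Spec_get_id_info get_id_info get_id_info_alt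
  cases hg : PySem.List.pyGet? lst oid with
  | none => simp
  | some operation =>
    cases hi : lookupId operation with
    | none => simp [hi]
    | some target =>
      simp only [hi, collectById_eq_filter, PySem.List.foldl_append_if_eq_filter, List.nil_append]
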